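-- pv_equiv track=rewrite | github.com/auxetica/newwordle.github.io | wordle.py | create_word_colors
-- ===== SOURCE A (Python) =====
-- def create_word_colors(answer, word):
--     letter_quantities = {}
--     colors = ['white'] * 5
--     i = 0
--     for letter in answer:
--         if letter not in letter_quantities:
--             letter_quantities[letter] = 1
--         elif letter in letter_quantities:
--             letter_quantities[letter] += 1
--     for letter in word:
--         if answer[i] == letter:
--             colors[i] = 'green'
--             letter_quantities[letter] -= 1
--         i+=1
--     i=0
--     for letter in word:
--         if answer[i] != letter:
--             if letter not in answer:
--                 colors[i] = 'white'
--             elif letter in answer: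
--                 if letter_quantities[letter] > 0:
--                     colors[i] = 'yellow'
--                     letter_quantities[letter] -= 1
--                 else:
--                     colors[i] = 'white'
--                     letter_quantities[letter] = 0
--         i+=1
--     return colors
-- ===== SOURCE B (Python) =====
-- def create_word_colors(answer, word):
--     # Counter-free closed form: each position's color is computed independently.
--     # A non-green position i is yellow iff the number of earlier non-green
--     # occurrences of word[i] in the guess is smaller than the number of
--     # occurrences of word[i] in the answer at non-green positions.
--     n = len(word)
--     def leftover(c):
--         return sum(1 for k in range(len(answer))
--                    if answer[k] == c and not (k < n and word[k] == c))
--     colors = []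
--     for i in range(n):
--         if answer[i] == word[i]:
--             colors.append('green')
--         else:
--             c = word[i]
--             earlier = sum(1 for j in range(i) if word[j] == c and answer[j] != c)
--             colors.append('yellow' if earlier < leftover(c) else 'white')
--     return colors + ['white'] * (5 - n)
-- ===== Notes on version B (the rewrite author's own statement) =====
-- stated objective: alternative
-- what changed: A threads a mutable letter-count dict through three passes (count all answer letters, decrement on greens, decrement on yellows); B keeps no state at all: it computes each position's color independently by a closed-form counting rule (non-green position i is yellow iff the number of earlier non-green occurrences of word[i] in the guess is below the number of non-green occurrences of word[i] in the answer), then pads with 'white' to length 5.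
-- outside the precondition, e.g. on create_word_colors('abc', 'abcd'): A raises IndexError, B raises IndexError
import Mathlib
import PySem

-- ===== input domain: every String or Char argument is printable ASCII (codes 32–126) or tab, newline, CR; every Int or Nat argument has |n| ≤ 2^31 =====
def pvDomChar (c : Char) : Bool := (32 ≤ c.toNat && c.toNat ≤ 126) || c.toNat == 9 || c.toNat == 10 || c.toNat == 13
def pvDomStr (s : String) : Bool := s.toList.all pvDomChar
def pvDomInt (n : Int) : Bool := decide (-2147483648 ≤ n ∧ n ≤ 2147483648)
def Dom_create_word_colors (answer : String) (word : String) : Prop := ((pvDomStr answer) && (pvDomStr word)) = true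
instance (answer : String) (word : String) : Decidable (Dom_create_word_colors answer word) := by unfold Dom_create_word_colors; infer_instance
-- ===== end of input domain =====

-- B replaces A's stateful three passes (count the answer letters into a dict, decrement it on
-- greens, decrement it again while scanning for yellows) by a stateless closed-form rule: each
-- position's color is computed independently by counting — a non-green position i is yellow iff
-- the number of earlier non-green occurrences of word[i] in the guess is below the number of
-- non-green occurrences of word[i] in the answer. Objective: alternative (no mutable state).

-- ===== PORT A =====
-- counting loop body: 'if letter not in lq: lq[letter]=1 elif letter in lq: lq[letter]+=1'
def cwcCountStep (d : PySem.Dict Char Int) (letter : Char) : PySem.Dict Char Int :=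
  if d.contains letter = false then d.insert letter 1
  else if d.contains letter = true then d.insert letter (d.getD letter 0 + 1)
  else d

-- green pass: 'for letter in word: if answer[i]==letter: colors[i]="green"; lq[letter]-=1; i+=1'
-- (answer[i] / colors[i] out of range raise in Python: excluded by Pre_; lq[letter] key exists there)
def cwcGreen (a : List Char) : List Char → Int → List String → PySem.Dict Char Int →
    List String × PySem.Dict Char Int
  | [], _, colors, d => (colors, d)
  | letter :: rest, i, colors, d =>
    if PySem.List.pyGetD a i ' ' = letter then
      cwcGreen a rest (i + 1) (PySem.List.pySetD colors i "green")
        (d.insert letter (d.getD letter 0 - 1))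
    else
      cwcGreen a rest (i + 1) colors d

-- yellow pass ('letter not in answer' on a 1-char needle is char membership)
def cwcYellow (a : List Char) : List Char → Int → List String → PySem.Dict Char Int →
    List String × PySem.Dict Char Int
  | [], _, colors, d => (colors, d)
  | letter :: rest, i, colors, d =>
    if PySem.List.pyGetD a i ' ' ≠ letter then
      if a.contains letter = false then
        cwcYellow a rest (i + 1) (PySem.List.pySetD colors i "white") d
      else if a.contains letter = true then
        if d.getD letter 0 > 0 then
          cwcYellow a rest (i + 1) (PySem.List.pySetD colors i "yellow")
            (d.insert letter (d.getD letter 0 - 1))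
        else
          cwcYellow a rest (i + 1) (PySem.List.pySetD colors i "white") (d.insert letter 0)
      else cwcYellow a rest (i + 1) colors d
    else cwcYellow a rest (i + 1) colors d

def create_word_colors (answer : String) (word : String) : List String :=
  let a := answer.toList
  let w := word.toList
  let lq := a.foldl cwcCountStep PySem.Dict.empty
  let r := cwcGreen a w 0 (List.replicate 5 "white") lq
  (cwcYellow a w 0 r.1 r.2).1

-- ===== PORT B =====
-- 'leftover(c)': occurrences of c in the answer at non-green positions
-- (indices k are produced by range(len(answer)), hence in range: getD is exact)
def cwcLeftover (a w : List Char) (n : Nat) (c : Char) : Int :=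
  (List.range a.length).foldl
    (fun s k => if a.getD k ' ' = c ∧ ¬ (k < n ∧ w.getD k ' ' = c) then s + 1 else s) 0

-- 'earlier': non-green occurrences of c in the guess before position i
def cwcEarlier (a w : List Char) (i : Nat) (c : Char) : Int :=
  (List.range i).foldl
    (fun s j => if w.getD j ' ' = c ∧ a.getD j ' ' ≠ c then s + 1 else s) 0

-- loop body: green on an exact match, else yellow iff earlier < leftover
def cwcColorAt (a w : List Char) (n i : Nat) : String :=
  if a.getD i ' ' = w.getD i ' ' then "green"
  else if cwcEarlier a w i (w.getD i ' ') < cwcLeftover a w n (w.getD i ' ') then "yellow"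
  else "white"

def create_word_colors_alt (answer : String) (word : String) : List String :=
  let a := answer.toList
  let w := word.toList
  let n := w.length
  (List.range n).foldl (fun acc i => acc ++ [cwcColorAt a w n i]) []
    ++ List.replicate (5 - n) "white"

-- ===== PRECONDITION & SPEC =====
-- Pre_ excludes exactly the inputs where A raises IndexError: a guess longer than the answer
-- (answer[i]) or longer than 5 (colors[i]); A returns normally on everything else.
def Pre_create_word_colors (answer : String) (word : String) : Prop :=
  word.toList.length ≤ answer.toList.length ∧ word.toList.length ≤ 5
instance (answer : String) (word : String) : Decidable (Pre_create_word_colors answer word) := by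
  unfold Pre_create_word_colors; infer_instance

def pvWitness_create_word_colors : String × String := ("crane", "cared")

def Spec_create_word_colors (answer : String) (word : String) (out : List String) : Prop :=
  out = create_word_colors_alt answer word
instance (answer : String) (word : String) (out : List String) :
    Decidable (Spec_create_word_colors answer word out) := by
  unfold Spec_create_word_colors; infer_instance

-- ===== CLAIM (what is proved, stated in full; the proofs are below) =====
def Claim_equal_create_word_colors : Prop := ∀ (answer : String) (word : String),
  Dom_create_word_colors answer word → Pre_create_word_colors answer word →
  Spec_create_word_colors answer word (create_word_colors answer word)

-- ===== LEMMAS AND PROOFS =====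

-- j is a green (exactly matched) position
def cwcMatchB (a w : List Char) (j : Nat) : Bool :=
  decide (j < w.length) && (w.getD j ' ' == a.getD j ' ')

-- answer letters at green positions (traversing answer and word in step)
def cwcGL : List Char → List Char → List Char
  | _, [] => []
  | [], _ :: _ => []
  | x :: xs, y :: ys => if y = x then x :: cwcGL xs ys else cwcGL xs ys

lemma cwcGL_nil (as : List Char) : cwcGL as [] = [] := by cases as <;> rfl

lemma cwc_setGetD (l : List String) (i : Nat) (v : String) (j : Nat) (d : String) :
    (l.set i v).getD j d = if j = i ∧ i < l.length then v else l.getD j d := by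
  rw [List.getD_eq_getElem?_getD, List.getD_eq_getElem?_getD, List.getElem?_set]
  by_cases hij : i = j
  · subst hij
    by_cases hl : i < l.length
    · rw [if_pos rfl, if_pos hl, if_pos ⟨rfl, hl⟩]
      rfl
    · rw [if_pos rfl, if_neg hl, if_neg (by rintro ⟨_, hh⟩; exact hl hh)]
      rw [List.getElem?_eq_none (by omega)]
  · rw [if_neg hij, if_neg (by rintro ⟨hh, _⟩; exact hij hh.symm)]

lemma cwc_set_id (l : List String) (i : Nat) (v : String) (hi : i < l.length)
    (hv : l.getD i "" = v) : l.set i v = l := by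
  apply List.ext_getElem (by simp)
  intro j h1 h2
  rw [List.getElem_set]
  split_ifs with h
  · subst h
    rw [← hv, List.getD_eq_getElem l "" hi]
  · rfl

lemma cwc_counter (a : List Char) (c : Char) :
    (a.foldl cwcCountStep PySem.Dict.empty).getD c 0 = (a.count c : Int) := by
  have hstep : cwcCountStep = fun d x => d.insert x (d.getD x 0 + 1) := by
    funext d x
    unfold cwcCountStep
    by_cases h : d.contains x
    · simp [h]
    · have hx : d.contains x = false := by simpa using h
      have h0 : d.getD x 0 = 0 := by simp [PySem.Dict.getD_of_not_contains, hx]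
      simp [hx, h0]
  rw [hstep, PySem.Dict.getD_foldl_insert_add_one]
  simp [PySem.Dict.getD_empty]

lemma cwcGreen_spec (a w : List Char) (hna : w.length ≤ a.length) :
    ∀ (k i : Nat) (cols : List String) (d : PySem.Dict Char Int), i + k = w.length →
      w.length ≤ cols.length →
      (cwcGreen a (w.drop i) (i : Int) cols d).1.length = cols.length ∧
      (∀ j : Nat, (cwcGreen a (w.drop i) (i : Int) cols d).1.getD j "" =
        if i ≤ j ∧ cwcMatchB a w j then "green" else cols.getD j "") ∧
      (∀ c : Char, (cwcGreen a (w.drop i) (i : Int) cols d).2.getD c 0 =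
        d.getD c 0 - ((cwcGL (a.drop i) (w.drop i)).count c : Int)) := by
  intro k
  induction k with
  | zero =>
    intro i cols d hik _
    have hi : i = w.length := by omega
    subst hi
    rw [List.drop_length]
    refine ⟨rfl, ?_, ?_⟩
    · intro j
      have hnot : ¬ (w.length ≤ j ∧ cwcMatchB a w j = true) := by
        rintro ⟨hj, hmj⟩
        simp only [cwcMatchB, Bool.and_eq_true, decide_eq_true_eq] at hmj
        omega
      rw [if_neg hnot]
      rfl
    · intro c
      rw [cwcGL_nil]
      simp [cwcGreen]
  | succ k ih =>
    intro i cols d hik hcl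
    have hiw : i < w.length := by omega
    have hia : i < a.length := by omega
    have hcast : ((i : Int) + 1) = ((i + 1 : Nat) : Int) := by push_cast; ring
    have hwi : w.getD i ' ' = w[i] := List.getD_eq_getElem w ' ' hiw
    have hai : a.getD i ' ' = a[i] := List.getD_eq_getElem a ' ' hia
    rw [List.drop_eq_getElem_cons hiw]
    by_cases hm : a.getD i ' ' = w[i]
    · -- green at position i
      have hcond : PySem.List.pyGetD a (i : Int) ' ' = w[i] := by simpa using hm
      simp only [cwcGreen, if_pos hcond, hcast, PySem.List.pySetD_natCast]
      obtain ⟨L, C, D⟩ := ih (i + 1) (cols.set i "green")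
        (d.insert w[i] (d.getD w[i] 0 - 1)) (by omega) (by simpa using hcl)
      have hmB : cwcMatchB a w i = true := by
        simp only [cwcMatchB, Bool.and_eq_true, decide_eq_true_eq, beq_iff_eq]
        exact ⟨hiw, by rw [hwi]; exact hm.symm⟩
      refine ⟨by rw [L]; simp, ?_, ?_⟩
      · intro j
        rw [C j, cwc_setGetD]
        rcases Nat.lt_trichotomy j i with hj | hj | hj
        · rw [if_neg (by rintro ⟨hh, _⟩; omega), if_neg (by rintro ⟨hh, _⟩; omega),
              if_neg (by rintro ⟨hh, _⟩; omega)]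
        · subst hj
          rw [if_neg (by rintro ⟨hh, _⟩; omega), if_pos ⟨rfl, by omega⟩,
              if_pos ⟨le_refl j, hmB⟩]
        · by_cases hmj : cwcMatchB a w j = true
          · rw [if_pos ⟨by omega, hmj⟩, if_pos ⟨by omega, hmj⟩]
          · rw [if_neg (by rintro ⟨_, hh⟩; exact hmj hh), if_neg (by rintro ⟨hh, _⟩; omega),
                if_neg (by rintro ⟨_, hh⟩; exact hmj hh)]
      · intro c
        rw [D c, PySem.Dict.getD_insert, List.drop_eq_getElem_cons hia]
        have hgl : cwcGL (a[i] :: a.drop (i+1)) (w[i] :: w.drop (i+1))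
            = a[i] :: cwcGL (a.drop (i+1)) (w.drop (i+1)) := by
          simp only [cwcGL]
          rw [if_pos (by rw [← hai]; exact hm.symm)]
        rw [hgl, List.count_cons]
        have haw : a[i] = w[i] := by rw [← hai]; exact hm
        by_cases hc : c = w[i]
        · subst hc
          rw [if_pos rfl, if_pos (by rw [haw]; exact BEq.rfl)]
          push_cast
          ring
        · rw [if_neg hc, if_neg (by rw [haw]; simpa using fun hh => hc hh.symm)]
          push_cast
          ring
    · -- no green at position i
      have hcond : ¬ (PySem.List.pyGetD a (i : Int) ' ' = w[i]) := by simpa using hm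
      simp only [cwcGreen, if_neg hcond, hcast]
      obtain ⟨L, C, D⟩ := ih (i + 1) cols d (by omega) hcl
      have hmB : ¬ (cwcMatchB a w i = true) := by
        simp only [cwcMatchB, Bool.and_eq_true, decide_eq_true_eq, beq_iff_eq]
        rintro ⟨_, hh⟩
        rw [hwi] at hh
        exact hm hh.symm
      refine ⟨L, ?_, ?_⟩
      · intro j
        rw [C j]
        rcases Nat.lt_trichotomy j i with hj | hj | hj
        · rw [if_neg (by rintro ⟨hh, _⟩; omega), if_neg (by rintro ⟨hh, _⟩; omega)]
        · subst hj
          rw [if_neg (by rintro ⟨hh, _⟩; omega), if_neg (by rintro ⟨_, hh⟩; exact hmB hh)]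
        · by_cases hmj : cwcMatchB a w j = true
          · rw [if_pos ⟨by omega, hmj⟩, if_pos ⟨by omega, hmj⟩]
          · rw [if_neg (by rintro ⟨_, hh⟩; exact hmj hh), if_neg (by rintro ⟨_, hh⟩; exact hmj hh)]
      · intro c
        rw [D c, List.drop_eq_getElem_cons hia]
        have hgl : cwcGL (a[i] :: a.drop (i+1)) (w[i] :: w.drop (i+1))
            = cwcGL (a.drop (i+1)) (w.drop (i+1)) := by
          simp only [cwcGL]
          rw [if_neg (by rw [← hai]; exact fun hh => hm hh.symm)]
        rw [hgl]

-- a counting foldl is an initial value plus a countP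
lemma cwc_foldl_count {α : Type} (p : α → Prop) [DecidablePred p] :
    ∀ (l : List α) (s : Int),
      l.foldl (fun s k => if p k then s + 1 else s) s
        = s + ((l.countP (fun k => decide (p k))) : Int) := by
  intro l
  induction l with
  | nil => intro s; simp
  | cons x xs ih =>
    intro s
    rw [List.foldl_cons, List.countP_cons]
    by_cases hx : p x
    · rw [if_pos hx, ih, if_pos (by simpa using hx)]
      push_cast; ring
    · rw [if_neg hx, ih, if_neg (by simpa using hx)]
      push_cast; ring

-- leftover(c) + greens(c) = count of c in the answer
lemma cwc_countP_split (c : Char) :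
    ∀ (a w : List Char), w.length ≤ a.length →
      (List.range a.length).countP
          (fun k => decide (a.getD k ' ' = c ∧ ¬ (k < w.length ∧ w.getD k ' ' = c)))
        + (cwcGL a w).count c = a.count c := by
  intro a
  induction a with
  | nil =>
    intro w h
    cases w with
    | nil => simp [cwcGL]
    | cons y ys => simp at h
  | cons x xs ih =>
    intro w h
    rw [List.length_cons, List.range_succ_eq_map, List.countP_cons, List.countP_map]
    cases w with
    | nil =>
      have hsh : ((fun k => decide ((x :: xs).getD k ' ' = c ∧
            ¬ (k < ([] : List Char).length ∧ ([] : List Char).getD k ' ' = c))) ∘ (· + 1))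
          = fun k => decide (xs.getD k ' ' = c ∧
            ¬ (k < ([] : List Char).length ∧ ([] : List Char).getD k ' ' = c)) := by
        funext k
        simp only [Function.comp_apply]
        apply decide_eq_decide.mpr
        simp
      rw [hsh]
      have hih := ih [] (by simp)
      rw [cwcGL_nil, List.count_nil, Nat.add_zero] at hih ⊢
      simp only [List.count_cons, beq_iff_eq] at hih ⊢
      by_cases hx : x = c
      · rw [if_pos (by simp [hx]), if_pos (by simp [hx])]
        omega
      · rw [if_neg (by simp [hx]), if_neg (by simp [hx])]
        omega
    | cons y ys =>
      have hsh : ((fun k => decide ((x :: xs).getD k ' ' = c ∧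
            ¬ (k < (y :: ys).length ∧ (y :: ys).getD k ' ' = c))) ∘ (· + 1))
          = fun k => decide (xs.getD k ' ' = c ∧
            ¬ (k < ys.length ∧ ys.getD k ' ' = c)) := by
        funext k
        simp only [Function.comp_apply]
        apply decide_eq_decide.mpr
        simp
      rw [hsh]
      have hih := ih ys (by simpa using h)
      by_cases hyx : y = x
      · have hgl : cwcGL (x :: xs) (y :: ys) = x :: cwcGL xs ys := by
          simp [cwcGL, hyx]
        rw [hgl, List.count_cons, List.count_cons]
        by_cases hxc : x = c
        · have hyc : y = c := hyx.trans hxc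
          rw [if_neg (by simp [hyc]), if_pos (by simp [hxc])]
          omega
        · rw [if_neg (by simp [hxc]),
              if_neg (by simp only [beq_iff_eq]; exact hxc)]
          omega
      · have hgl : cwcGL (x :: xs) (y :: ys) = cwcGL xs ys := by
          simp [cwcGL, hyx]
        rw [hgl, List.count_cons]
        by_cases hxc : x = c
        · have hyc : ¬ (y = c) := fun hy => hyx (hy.trans hxc.symm)
          rw [if_pos (by simp [hxc, hyc]), if_pos (by simp [hxc])]
          omega
        · rw [if_neg (by simp [hxc]),
              if_neg (by simp only [beq_iff_eq]; exact hxc)]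
          omega

lemma cwcLeftover_eq_countP (a w : List Char) (n : Nat) (c : Char) :
    cwcLeftover a w n c = ((List.range a.length).countP
      (fun k => decide (a.getD k ' ' = c ∧ ¬ (k < n ∧ w.getD k ' ' = c))) : Int) := by
  unfold cwcLeftover
  rw [cwc_foldl_count (fun k => a.getD k ' ' = c ∧ ¬ (k < n ∧ w.getD k ' ' = c))]
  ring

lemma cwcLeftover_of_not_mem (a w : List Char) (n : Nat) (c : Char)
    (hc : a.contains c = false) : cwcLeftover a w n c = 0 := by
  rw [cwcLeftover_eq_countP]
  have : (List.range a.length).countP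
      (fun k => decide (a.getD k ' ' = c ∧ ¬ (k < n ∧ w.getD k ' ' = c))) = 0 := by
    rw [List.countP_eq_zero]
    intro k hk
    simp only [List.mem_range] at hk
    simp only [decide_eq_true_eq, not_and]
    intro hak
    exfalso
    have : c ∈ a := by
      rw [← hak]
      rw [List.getD_eq_getElem a ' ' hk]
      exact List.getElem_mem hk
    simp at hc
    exact hc this
  rw [this]; rfl

lemma cwcEarlier_zero (a w : List Char) (c : Char) : cwcEarlier a w 0 c = 0 := by
  simp [cwcEarlier]

lemma cwcEarlier_nonneg (a w : List Char) (i : Nat) (c : Char) :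
    0 ≤ cwcEarlier a w i c := by
  unfold cwcEarlier
  rw [cwc_foldl_count (fun j => w.getD j ' ' = c ∧ a.getD j ' ' ≠ c)]
  positivity

lemma cwcEarlier_succ (a w : List Char) (i : Nat) (c : Char) :
    cwcEarlier a w (i + 1) c
      = cwcEarlier a w i c + (if w.getD i ' ' = c ∧ a.getD i ' ' ≠ c then 1 else 0) := by
  unfold cwcEarlier
  rw [List.range_succ, List.foldl_append, List.foldl_cons, List.foldl_nil]
  split_ifs <;> ring

-- the yellow pass realises the closed-form rule of cwcColorAt
lemma cwcYellow_spec (a w : List Char) (hna : w.length ≤ a.length) (h5 : w.length ≤ 5) :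
    ∀ (k i : Nat) (cols : List String) (d : PySem.Dict Char Int), i + k = w.length →
      cols.length = 5 →
      (∀ j : Nat, i ≤ j → j < w.length →
        cols.getD j "" = if cwcMatchB a w j then "green" else "white") →
      (∀ c : Char, d.getD c 0 = max (cwcLeftover a w w.length c - cwcEarlier a w i c) 0) →
      (cwcYellow a (w.drop i) (i : Int) cols d).1.length = cols.length ∧
      (∀ j : Nat, (cwcYellow a (w.drop i) (i : Int) cols d).1.getD j "" =
        if i ≤ j ∧ j < w.length then cwcColorAt a w w.length j else cols.getD j "") := by
  intro k
  induction k with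
  | zero =>
    intro i cols d hik hlen hcols hpool
    have hi : i = w.length := by omega
    subst hi
    rw [List.drop_length]
    refine ⟨rfl, ?_⟩
    intro j
    rw [if_neg (by rintro ⟨hh1, hh2⟩; omega)]
    rfl
  | succ k ih =>
    intro i cols d hik hlen hcols hpool
    have hiw : i < w.length := by omega
    have hia : i < a.length := by omega
    have hcast : ((i : Int) + 1) = ((i + 1 : Nat) : Int) := by push_cast; ring
    have hwi : w.getD i ' ' = w[i] := List.getD_eq_getElem w ' ' hiw
    have hai : a.getD i ' ' = a[i] := List.getD_eq_getElem a ' ' hia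
    rw [List.drop_eq_getElem_cons hiw]
    by_cases hm : a.getD i ' ' = w.getD i ' '
    · -- green position: the loop skips, earlier-counts do not move
      have hA : ¬ (PySem.List.pyGetD a (i : Int) ' ' ≠ w[i]) := by
        simp only [PySem.List.pyGetD_natCast, not_not]
        rw [← hwi]; exact hm
      simp only [cwcYellow]
      rw [if_neg hA, hcast]
      have hE : ∀ c : Char, cwcEarlier a w (i + 1) c = cwcEarlier a w i c := by
        intro c
        rw [cwcEarlier_succ, if_neg (by rintro ⟨hh1, hh2⟩; rw [← hh1] at hh2; exact hh2 hm)]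
        ring
      obtain ⟨L, C⟩ := ih (i + 1) cols d (by omega) hlen
        (fun j h1 h2 => hcols j (by omega) h2) (fun c => by rw [hE c]; exact hpool c)
      refine ⟨L, ?_⟩
      intro j
      rw [C j]
      rcases Nat.lt_trichotomy j i with hj | hj | hj
      · rw [if_neg (by rintro ⟨hh, _⟩; omega), if_neg (by rintro ⟨hh, _⟩; omega)]
      · subst hj
        rw [if_neg (by rintro ⟨hh, _⟩; omega), if_pos ⟨le_refl j, hiw⟩]
        have hmB : cwcMatchB a w j = true := by
          simp only [cwcMatchB, Bool.and_eq_true, decide_eq_true_eq, beq_iff_eq]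
          exact ⟨hiw, hm.symm⟩
        rw [hcols j (le_refl j) hiw, if_pos hmB]
        unfold cwcColorAt
        rw [if_pos hm]
      · by_cases hjw : j < w.length
        · rw [if_pos ⟨by omega, hjw⟩, if_pos ⟨by omega, hjw⟩]
        · rw [if_neg (by rintro ⟨_, hh⟩; exact hjw hh), if_neg (by rintro ⟨_, hh⟩; exact hjw hh)]
    · -- non-green position
      have hA : PySem.List.pyGetD a (i : Int) ' ' ≠ w[i] := by
        simp only [PySem.List.pyGetD_natCast]
        rw [← hwi]; exact hm
      set c := w[i] with hc
      have hmc : a.getD i ' ' ≠ c := by rw [← hwi]; exact hm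
      have hcw : cols.getD i "" = "white" := by
        rw [hcols i (le_refl i) hiw, if_neg ?_]
        simp only [cwcMatchB, Bool.and_eq_true, decide_eq_true_eq, beq_iff_eq]
        rintro ⟨_, hh⟩
        exact hmc (hh.symm.trans hwi)
      have hEi : ∀ c' : Char, cwcEarlier a w (i + 1) c'
          = cwcEarlier a w i c' + (if c' = c then 1 else 0) := by
        intro c'
        rw [cwcEarlier_succ]
        by_cases hcc : c' = c
        · rw [if_pos hcc, if_pos ⟨by rw [hcc]; exact hwi, by rw [hcc]; exact hmc⟩]
        · rw [if_neg hcc, if_neg (by rintro ⟨hh, _⟩; exact hcc (hh.symm.trans hwi))]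
      have hcolorAt : cwcColorAt a w w.length i
          = if cwcEarlier a w i c < cwcLeftover a w w.length c then "yellow" else "white" := by
        unfold cwcColorAt
        rw [if_neg hm, hwi]
      simp only [cwcYellow]
      rw [if_pos hA, hcast]
      by_cases hcn : a.contains c = true
      · by_cases hv : d.getD c 0 > 0
        · -- yellow: color position i and decrement
          rw [if_neg (by rw [hcn]; simp), if_pos hcn, if_pos hv, PySem.List.pySetD_natCast]
          have hlt : cwcEarlier a w i c < cwcLeftover a w w.length c := by
            have := hpool c; omega
          have hcols' : ∀ j : Nat, i + 1 ≤ j → j < w.length →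
              (cols.set i "yellow").getD j "" = if cwcMatchB a w j then "green" else "white" := by
            intro j h1 h2
            rw [cwc_setGetD, if_neg (by rintro ⟨hh, _⟩; omega)]
            exact hcols j (by omega) h2
          have hpool' : ∀ c' : Char, (d.insert c (d.getD c 0 - 1)).getD c' 0
              = max (cwcLeftover a w w.length c' - cwcEarlier a w (i + 1) c') 0 := by
            intro c'
            rw [PySem.Dict.getD_insert, hEi c']
            by_cases hcc : c' = c
            · rw [if_pos hcc, if_pos hcc, hcc, hpool c]
              omega
            · rw [if_neg hcc, if_neg hcc, hpool c']
              omega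
          obtain ⟨L, C⟩ := ih (i + 1) (cols.set i "yellow")
            (d.insert c (d.getD c 0 - 1)) (by omega) (by simp [hlen]) hcols' hpool'
          refine ⟨by rw [L]; simp, ?_⟩
          intro j
          rw [C j, cwc_setGetD]
          rcases Nat.lt_trichotomy j i with hj | hj | hj
          · rw [if_neg (by rintro ⟨hh, _⟩; omega), if_neg (by rintro ⟨hh, _⟩; omega),
                if_neg (by rintro ⟨hh, _⟩; omega)]
          · subst hj
            rw [if_neg (by rintro ⟨hh, _⟩; omega), if_pos ⟨rfl, by omega⟩,
                if_pos ⟨le_refl j, hiw⟩, hcolorAt, if_pos hlt]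
          · by_cases hjw : j < w.length
            · rw [if_pos ⟨by omega, hjw⟩, if_pos ⟨by omega, hjw⟩]
            · rw [if_neg (by rintro ⟨_, hh⟩; exact hjw hh),
                  if_neg (by rintro ⟨hh, _⟩; omega),
                  if_neg (by rintro ⟨_, hh⟩; exact hjw hh)]
        · -- pool exhausted: white, zero the key
          rw [if_neg (by rw [hcn]; simp), if_pos hcn, if_neg hv, PySem.List.pySetD_natCast,
              cwc_set_id cols i "white" (by omega) hcw]
          have hge : ¬ (cwcEarlier a w i c < cwcLeftover a w w.length c) := by
            have := hpool c; omega
          have hpool' : ∀ c' : Char, (d.insert c 0).getD c' 0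
              = max (cwcLeftover a w w.length c' - cwcEarlier a w (i + 1) c') 0 := by
            intro c'
            rw [PySem.Dict.getD_insert, hEi c']
            by_cases hcc : c' = c
            · rw [if_pos hcc, if_pos hcc, hcc]
              have := hpool c; omega
            · rw [if_neg hcc, if_neg hcc, hpool c']
              omega
          obtain ⟨L, C⟩ := ih (i + 1) cols (d.insert c 0) (by omega) hlen
            (fun j h1 h2 => hcols j (by omega) h2) hpool'
          refine ⟨L, ?_⟩
          intro j
          rw [C j]
          rcases Nat.lt_trichotomy j i with hj | hj | hj
          · rw [if_neg (by rintro ⟨hh, _⟩; omega), if_neg (by rintro ⟨hh, _⟩; omega)]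
          · subst hj
            rw [if_neg (by rintro ⟨hh, _⟩; omega), if_pos ⟨le_refl j, hiw⟩, hcolorAt,
                if_neg hge, hcw]
          · by_cases hjw : j < w.length
            · rw [if_pos ⟨by omega, hjw⟩, if_pos ⟨by omega, hjw⟩]
            · rw [if_neg (by rintro ⟨_, hh⟩; exact hjw hh),
                  if_neg (by rintro ⟨_, hh⟩; exact hjw hh)]
      · -- letter not in the answer: white, pool untouched
        have hcn' : a.contains c = false := by simpa using hcn
        rw [if_pos hcn', PySem.List.pySetD_natCast,
            cwc_set_id cols i "white" (by omega) hcw]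
        have hL0 : cwcLeftover a w w.length c = 0 := cwcLeftover_of_not_mem a w w.length c hcn'
        have hge : ¬ (cwcEarlier a w i c < cwcLeftover a w w.length c) := by
          have := cwcEarlier_nonneg a w i c; omega
        have hpool' : ∀ c' : Char, d.getD c' 0
            = max (cwcLeftover a w w.length c' - cwcEarlier a w (i + 1) c') 0 := by
          intro c'
          rw [hEi c', hpool c']
          by_cases hcc : c' = c
          · rw [if_pos hcc, hcc, hL0]
            have h1 := cwcEarlier_nonneg a w i c
            omega
          · rw [if_neg hcc]
            omega
        obtain ⟨L, C⟩ := ih (i + 1) cols d (by omega) hlen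
          (fun j h1 h2 => hcols j (by omega) h2) hpool'
        refine ⟨L, ?_⟩
        intro j
        rw [C j]
        rcases Nat.lt_trichotomy j i with hj | hj | hj
        · rw [if_neg (by rintro ⟨hh, _⟩; omega), if_neg (by rintro ⟨hh, _⟩; omega)]
        · subst hj
          rw [if_neg (by rintro ⟨hh, _⟩; omega), if_pos ⟨le_refl j, hiw⟩, hcolorAt,
              if_neg hge, hcw]
        · by_cases hjw : j < w.length
          · rw [if_pos ⟨by omega, hjw⟩, if_pos ⟨by omega, hjw⟩]
          · rw [if_neg (by rintro ⟨_, hh⟩; exact hjw hh),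
                if_neg (by rintro ⟨_, hh⟩; exact hjw hh)]

-- the B loop 'for i in range(n): colors.append(...)' builds the map over range n
lemma cwc_foldl_append_map {α β : Type} (f : α → β) :
    ∀ (l : List α) (init : List β),
      l.foldl (fun acc i => acc ++ [f i]) init = init ++ l.map f := by
  intro l
  induction l with
  | nil => intro init; simp
  | cons x xs ih => intro init; rw [List.foldl_cons, ih, List.map_cons]; simp

-- ===== VERDICT (by name: the statement is the Claim_ definition above) =====
theorem create_word_colors_spec : Claim_equal_create_word_colors := by
  intro answer word _ hpre
  obtain ⟨h1, h2⟩ := hpre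
  unfold Spec_create_word_colors create_word_colors create_word_colors_alt
  dsimp only
  set a := answer.toList
  set w := word.toList
  set n := w.length with hn
  have hG := cwcGreen_spec a w h1 n 0 (List.replicate 5 "white")
      (a.foldl cwcCountStep PySem.Dict.empty) (by omega) (by simpa using h2)
  simp only [Nat.cast_zero, List.drop_zero] at hG
  obtain ⟨gL1, gC1, gD1⟩ := hG
  set cols1 := (cwcGreen a w 0 (List.replicate 5 "white")
      (a.foldl cwcCountStep PySem.Dict.empty)).1 with hcols1
  set d1 := (cwcGreen a w 0 (List.replicate 5 "white")
      (a.foldl cwcCountStep PySem.Dict.empty)).2 with hd1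
  have hrep : ∀ j : Nat, j < 5 → (List.replicate 5 "white").getD j "" = "white" := by
    intro j hj
    rw [List.getD_eq_getElem _ "" (by simp only [List.length_replicate]; omega)]
    simp only [List.getElem_replicate]
  have hcols : ∀ j : Nat, 0 ≤ j → j < n →
      cols1.getD j "" = if cwcMatchB a w j then "green" else "white" := by
    intro j _ hjw
    rw [gC1 j]
    by_cases hmj : cwcMatchB a w j = true
    · rw [if_pos ⟨Nat.zero_le j, hmj⟩, if_pos hmj]
    · rw [if_neg (by rintro ⟨_, hh⟩; exact hmj hh), if_neg hmj, hrep j (by omega)]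
  have hpool : ∀ c : Char, d1.getD c 0
      = max (cwcLeftover a w n c - cwcEarlier a w 0 c) 0 := by
    intro c
    rw [gD1 c, cwc_counter, cwcEarlier_zero, cwcLeftover_eq_countP]
    have := cwc_countP_split c a w h1
    rw [← hn] at this
    omega
  have hY := cwcYellow_spec a w h1 h2 n 0 cols1 d1 (by omega) (by rw [gL1]; simp) hcols hpool
  simp only [Nat.cast_zero, List.drop_zero] at hY
  obtain ⟨yL, yC⟩ := hY
  rw [cwc_foldl_append_map, List.nil_append]
  apply List.ext_getElem
  · rw [yL, gL1]
    simp only [List.length_append, List.length_map, List.length_range,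
      List.length_replicate]
    omega
  · intro j hj1 hj2
    have hj5 : j < 5 := by rw [yL, gL1] at hj1; simpa using hj1
    rw [← List.getD_eq_getElem _ "" hj1, yC j]
    by_cases hjn : j < n
    · rw [if_pos ⟨Nat.zero_le j, hjn⟩]
      rw [List.getElem_append_left (by simpa using hjn)]
      rw [List.getElem_map, List.getElem_range]
    · rw [if_neg (by rintro ⟨_, hh⟩; exact hjn hh)]
      rw [List.getElem_append_right (by simpa using hjn)]
      simp only [List.getElem_replicate]
      rw [gC1 j]
      rw [if_neg ?_, hrep j hj5]
      rintro ⟨_, hmj⟩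
      simp only [cwcMatchB, Bool.and_eq_true, decide_eq_true_eq] at hmj
      exact hjn hmj.1
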